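-- pv_equiv track=rewrite | github.com/tlplayer/BG-AI-Scripts | Compiler/debug.py | add_display_string_head
-- ===== SOURCE A (Python) =====
-- def add_display_string_head(ai_script, start_number):
--     """
--     Inserts DisplayStringHead(Myself, N) into each THEN/RESPONSE block.
--     """
--     lines = ai_script.splitlines()
--     modified_lines = []
--
--     in_then_block = False
--     display_number = start_number
--
--     for line in lines:
--         stripped = line.strip()
--
--         # Always keep the original line
--         modified_lines.append(line)
--
--         # Skip comments and empty lines
--         if stripped.startswith("//") or not stripped:
--             continue
--
--         # Detect THEN block (case-insensitive)
--         if stripped.upper().startswith("THEN"):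
--             in_then_block = True
--
--         # Insert after first RESPONSE line in this THEN block
--         elif in_then_block and stripped.upper().startswith("RESPONSE"):
--             indent = " " * (len(line) - len(line.lstrip()))  # preserve indentation
--             modified_lines.append(f"{indent}DisplayStringHead(Myself,{display_number})")
--             display_number += 1
--             in_then_block = False  # only once per block
--
--     return "\n".join(modified_lines), display_number
-- ===== SOURCE B (Python) =====
-- def add_display_string_head(ai_script, start_number):
--     """
--     Inserts DisplayStringHead(Myself, N) into each THEN/RESPONSE block.
--     Nested-scan decomposition: on a THEN line an inner loop walks forward
--     to the block's first RESPONSE line and inserts right there.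
--     """
--     lines = ai_script.splitlines()
--     out = []
--     n = start_number
--     i = 0
--     total = len(lines)
--     while i < total:
--         line = lines[i]
--         out.append(line)
--         i += 1
--         st = line.strip()
--         if st and not st.startswith("//") and st.upper().startswith("THEN"):
--             # inner scan: consume lines until the block's first RESPONSE
--             while i < total:
--                 cur = lines[i]
--                 out.append(cur)
--                 i += 1
--                 cst = cur.strip()
--                 if not cst or cst.startswith("//"):
--                     continue
--                 if cst.upper().startswith("THEN"):
--                     continue
--                 if cst.upper().startswith("RESPONSE"):
--                     indent = " " * (len(cur) - len(cur.lstrip()))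
--                     out.append(indent + "DisplayStringHead(Myself," + str(n) + ")")
--                     n += 1
--                     break
--     return "\n".join(out), n
-- ===== Notes on version B (the rewrite author's own statement) =====
-- stated objective: alternative
-- what changed: Replaces A's single pass with an in_then_block boolean flag by a nested-loop decomposition: an outer scan over the lines that, on each THEN line, runs an inner scan consuming lines up to the block's first RESPONSE (inserting there) and resumes the outer scan after it, so no flag state is carried.
import Mathlib
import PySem

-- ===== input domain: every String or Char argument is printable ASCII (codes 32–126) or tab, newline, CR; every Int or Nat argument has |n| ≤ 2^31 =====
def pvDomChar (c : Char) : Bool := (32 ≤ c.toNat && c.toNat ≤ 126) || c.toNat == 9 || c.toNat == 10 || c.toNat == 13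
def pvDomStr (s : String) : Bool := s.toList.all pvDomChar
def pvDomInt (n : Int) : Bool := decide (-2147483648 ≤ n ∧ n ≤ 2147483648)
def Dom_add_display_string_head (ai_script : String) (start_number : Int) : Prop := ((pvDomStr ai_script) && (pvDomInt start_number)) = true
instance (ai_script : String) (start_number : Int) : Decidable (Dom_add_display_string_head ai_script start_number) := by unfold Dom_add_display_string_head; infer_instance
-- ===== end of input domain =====

-- B replaces A's boolean-flag single pass by an outer scan with an inner scan to each block's
-- first RESPONSE line (alternative decomposition, same cost); return values proved equal everywhere.

-- the inserted line f"{indent}DisplayStringHead(Myself,{display_number})" (same f-string in A and B)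
def pvIns (line : String) (dn : Int) : String :=
  String.ofList (List.replicate (PySem.Str.len line - PySem.Str.len (PySem.Str.lstrip line)).toNat ' ')
    ++ "DisplayStringHead(Myself," ++ PySem.Int.toStr dn ++ ")"

-- ===== PORT A =====
-- loop body of A's for-loop; state = (modified_lines, in_then_block, display_number)
def pvStepA (st : List String × Bool × Int) (line : String) : List String × Bool × Int :=
  let stripped := PySem.Str.strip line
  let acc := st.1 ++ [line]
  if PySem.Str.startswith stripped "//" || stripped == "" then (acc, st.2.1, st.2.2)
  else if PySem.Str.startswith (PySem.Str.upper stripped) "THEN" then (acc, true, st.2.2)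
  else if st.2.1 && PySem.Str.startswith (PySem.Str.upper stripped) "RESPONSE" then
    (acc ++ [pvIns line st.2.2], false, st.2.2 + 1)
  else (acc, st.2.1, st.2.2)

def add_display_string_head (ai_script : String) (start_number : Int) : String × Int :=
  let lines := PySem.Str.splitlines ai_script
  let r := lines.foldl pvStepA ([], false, start_number)
  (PySem.Str.join "\n" r.1, r.2.2)

-- ===== PORT B =====
-- inner scan of Source B: consume lines until the first RESPONSE of the block;
-- returns (lines emitted incl. the insertion, remaining lines, whether RESPONSE was found)
def pvSeek (ls : List String) (dn : Int) : List String × List String × Bool :=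
  match ls with
  | [] => ([], [], false)
  | l :: rest =>
    let cst := PySem.Str.strip l
    if cst == "" || PySem.Str.startswith cst "//" then
      let r := pvSeek rest dn; (l :: r.1, r.2.1, r.2.2)
    else if PySem.Str.startswith (PySem.Str.upper cst) "THEN" then
      let r := pvSeek rest dn; (l :: r.1, r.2.1, r.2.2)
    else if PySem.Str.startswith (PySem.Str.upper cst) "RESPONSE" then
      ([l, pvIns l dn], rest, true)
    else
      let r := pvSeek rest dn; (l :: r.1, r.2.1, r.2.2)

theorem pvSeek_rest_length (ls : List String) (dn : Int) : (pvSeek ls dn).2.1.length ≤ ls.length := by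
  induction ls with
  | nil => simp [pvSeek]
  | cons l rest ih =>
    simp only [pvSeek]
    split_ifs <;> simp <;> omega

-- outer while-loop of Source B
def pvOuter (ls : List String) (dn : Int) : List String × Int :=
  match ls with
  | [] => ([], dn)
  | l :: rest =>
    let st := PySem.Str.strip l
    if (!(st == "") && !PySem.Str.startswith st "//") && PySem.Str.startswith (PySem.Str.upper st) "THEN" then
      let r := pvSeek rest dn
      if r.2.2 then
        let t := pvOuter r.2.1 (dn + 1)
        (l :: (r.1 ++ t.1), t.2)
      else (l :: r.1, dn)
    else
      let t := pvOuter rest dn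
      (l :: t.1, t.2)
termination_by ls.length
decreasing_by
  · have := pvSeek_rest_length rest dn; simp at *; omega
  · simp

def add_display_string_head_alt (ai_script : String) (start_number : Int) : String × Int :=
  let r := pvOuter (PySem.Str.splitlines ai_script) start_number
  (PySem.Str.join "\n" r.1, r.2)

-- ===== PRECONDITION & SPEC =====
def Spec_add_display_string_head (ai_script : String) (start_number : Int) (out : String × Int) : Prop := out = add_display_string_head_alt ai_script start_number
instance (ai_script : String) (start_number : Int) (out : String × Int) : Decidable (Spec_add_display_string_head ai_script start_number out) := by unfold Spec_add_display_string_head; infer_instance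

-- ===== CLAIM (what is proved, stated in full; the proofs are below) =====
def Claim_equal_add_display_string_head : Prop := ∀ (ai_script : String) (start_number : Int), Dom_add_display_string_head ai_script start_number → Spec_add_display_string_head ai_script start_number (add_display_string_head ai_script start_number)

-- ===== LEMMAS AND PROOFS =====

-- cons-style restatement of A's fold (produced lines, final flag, final counter)
def pvA : List String → Bool → Int → List String × Bool × Int
  | [], flag, dn => ([], flag, dn)
  | l :: rest, flag, dn =>
    let stripped := PySem.Str.strip l
    if PySem.Str.startswith stripped "//" || stripped == "" then
      let r := pvA rest flag dn; (l :: r.1, r.2)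
    else if PySem.Str.startswith (PySem.Str.upper stripped) "THEN" then
      let r := pvA rest true dn; (l :: r.1, r.2)
    else if flag && PySem.Str.startswith (PySem.Str.upper stripped) "RESPONSE" then
      let r := pvA rest false (dn + 1); (l :: pvIns l dn :: r.1, r.2)
    else
      let r := pvA rest flag dn; (l :: r.1, r.2)

theorem foldl_eq_pvA : ∀ (ls : List String) (acc : List String) (flag : Bool) (dn : Int),
    ls.foldl pvStepA (acc, flag, dn) = (acc ++ (pvA ls flag dn).1, (pvA ls flag dn).2) := by
  intro ls
  induction ls with
  | nil => intro acc flag dn; simp [pvA]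
  | cons l rest ih =>
    intro acc flag dn
    simp only [List.foldl_cons, pvStepA, pvA]
    split_ifs with h1 h2 h3 <;> simp [ih, List.append_assoc]

-- the joint induction
theorem pvMain : ∀ (k : Nat) (ls : List String), ls.length ≤ k → ∀ (dn : Int),
    (((pvA ls false dn).1, (pvA ls false dn).2.2) = pvOuter ls dn) ∧
    (((pvSeek ls dn).2.2 = true →
        (pvA ls true dn).1 = (pvSeek ls dn).1 ++ (pvOuter (pvSeek ls dn).2.1 (dn + 1)).1 ∧
        (pvA ls true dn).2.2 = (pvOuter (pvSeek ls dn).2.1 (dn + 1)).2) ∧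
     ((pvSeek ls dn).2.2 = false →
        (pvA ls true dn).1 = (pvSeek ls dn).1 ∧ (pvA ls true dn).2.2 = dn)) := by
  intro k
  induction k with
  | zero =>
    intro ls hls dn
    have : ls = [] := List.eq_nil_of_length_eq_zero (Nat.le_zero.mp hls)
    subst this
    simp [pvA, pvSeek, pvOuter]
  | succ k ih =>
    intro ls hls dn
    match ls with
    | [] => simp [pvA, pvSeek, pvOuter]
    | l :: rest =>
      have hrest : rest.length ≤ k := by simp at hls; omega
      have ihF := fun dn => (ih rest hrest dn).1
      have ihT := fun dn => (ih rest hrest dn).2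
      rw [pvOuter]
      cases hc1 : PySem.Str.startswith (PySem.Str.strip l) "//" <;>
      cases hc2 : (PySem.Str.strip l == "") <;>
      cases hc3 : PySem.Str.startswith (PySem.Str.upper (PySem.Str.strip l)) "THEN" <;>
      cases hc4 : PySem.Str.startswith (PySem.Str.upper (PySem.Str.strip l)) "RESPONSE" <;>
      simp only [pvA, pvSeek, hc1, hc2, hc3, hc4, Bool.or_true,
        Bool.or_false, Bool.and_true, Bool.and_false,
        Bool.not_true, Bool.not_false, if_true] <;>
      simp <;>
      (try (have hF := ihF dn;
            have hF' := ihF (dn + 1);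
            obtain ⟨hT1, hT2⟩ := ihT dn;
            rw [Prod.ext_iff] at hF hF';
            simp only [] at hF hF';
            cases hf : (pvSeek rest dn).2.2 <;> simp_all))

-- ===== VERDICT (by name: the statement is the Claim_ definition above) =====
theorem add_display_string_head_spec : Claim_equal_add_display_string_head := by
  intro ai_script start_number _
  unfold Spec_add_display_string_head add_display_string_head add_display_string_head_alt
  have hfold := foldl_eq_pvA (PySem.Str.splitlines ai_script) [] false start_number
  have hmain := (pvMain (PySem.Str.splitlines ai_script).length (PySem.Str.splitlines ai_script) le_rfl start_number).1
  simp only [hfold, List.nil_append]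
  rw [← hmain]
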